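-- pv_equiv track=rewrite | github.com/katesanders9/multimodal-proofs | tools/clean_text.py | clean_script
-- ===== SOURCE A (Python) =====
-- def remove_p(x):
-- 	flag = 1
-- 	while flag:
-- 		flag = 0
-- 		s = -1
-- 		for i in range(len(x)):
-- 			if s < 0 and x[i] == '(':
-- 				s = i
-- 			elif s >= 0 and x[i] == ')':
-- 				x = x[:s] + x[i+1:]
-- 				flag = 1
-- 				break
-- 	return x
--
-- def clean_script(x, show):
-- 	r = []
-- 	if show == 'friends':
-- 		for i in x:
-- 			if ': ' in i and not i.startswith('SCENE'):
-- 				a = i.split(':')[0]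
-- 				b = i[len(a)+1:]
-- 				b = remove_p(b)
-- 				r.append([a,b])
--
-- 	if show == 'met':
-- 		for i in x:
-- 			if ':' in i:
-- 				a = i.split(':')[0]
-- 				b = i[len(a)+1:]
-- 				b = remove_p(b)
-- 				r.append([a,b])
--
-- 	if show == 'bang':
-- 		for i in x:
-- 			if ':' in i and not i.startswith('Scene'):
-- 				a = i.split(':')[0]
-- 				b = i[len(a)+1:]
-- 				b = remove_p(b)
-- 				r.append([a,b])
--
-- 	if show == 'house':
-- 		for i in x:
-- 			if ':' in i:
-- 				a = i.split(':')[0]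
-- 				b = i[len(a)+1:]
-- 				b = remove_p(b)
-- 				r.append([a,b])
--
-- 	if show == 'grey':
-- 		for i in x:
-- 			if ':' in i:
-- 				a = i.split(':')[0]
-- 				b = i[len(a)+1:]
-- 				b = remove_p(b)
-- 				r.append([a,b])
--
-- 	if show == 'castle':
-- 		i = 0
-- 		while i < len(x):
-- 			if x[i].isupper() and x[i+1]:
-- 				a = x[i]
-- 				b = x[i+1]
-- 				b = remove_p(b)
-- 				r.append([a,b])
--
-- 	return r
-- ===== SOURCE B (Python) =====
-- # B: one left-to-right pass per line: each '('..')' span is skipped by jumping between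
-- # str.find results and copying whole slices; the per-show line loops are driven by a
-- # predicate table.
--
-- def _strip_parens(s):
--     out = []
--     i = 0
--     while True:
--         j = s.find('(', i)
--         if j == -1:                 # no '(' left: keep the rest
--             out.append(s[i:])
--             break
--         k = s.find(')', j + 1)
--         if k == -1:                 # unmatched '(' keeps the rest, like A's no-op pass
--             out.append(s[i:])
--             break
--         out.append(s[i:j])          # drop s[j..k] inclusive
--         i = k + 1
--     return ''.join(out)
--
-- _PREDS = {
--     'friends': lambda s: ': ' in s and not s.startswith('SCENE'),
--     'met': lambda s: ':' in s,
--     'bang': lambda s: ':' in s and not s.startswith('Scene'),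
--     'house': lambda s: ':' in s,
--     'grey': lambda s: ':' in s,
-- }
--
-- def clean_script(x, show):
--     keep = _PREDS.get(show)
--     if keep is None:
--         # unknown show -> []; 'castle' (A's while-loop never terminates on nonempty x) is
--         # excluded by the precondition, on empty x it contributes nothing.
--         return []
--     r = []
--     for line in x:
--         if keep(line):
--             a, _, b = line.partition(':')
--             r.append([a, _strip_parens(b)])
--     return r
-- ===== Notes on version B (the rewrite author's own statement) =====
-- stated objective: alternative
-- what changed: remove_p's restart-the-whole-scan-after-each-removal loop with repeated re-slicing is replaced by a single left-to-right pass that skips each '('..')' span via str.find jumps, and the five per-show copies of the line loop collapse into one loop driven by a predicate table; Pre_ excludes show=='castle' with nonempty x, where A's while-loop never increments i and so never returns (it loops forever or raises IndexError).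
import Mathlib
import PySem

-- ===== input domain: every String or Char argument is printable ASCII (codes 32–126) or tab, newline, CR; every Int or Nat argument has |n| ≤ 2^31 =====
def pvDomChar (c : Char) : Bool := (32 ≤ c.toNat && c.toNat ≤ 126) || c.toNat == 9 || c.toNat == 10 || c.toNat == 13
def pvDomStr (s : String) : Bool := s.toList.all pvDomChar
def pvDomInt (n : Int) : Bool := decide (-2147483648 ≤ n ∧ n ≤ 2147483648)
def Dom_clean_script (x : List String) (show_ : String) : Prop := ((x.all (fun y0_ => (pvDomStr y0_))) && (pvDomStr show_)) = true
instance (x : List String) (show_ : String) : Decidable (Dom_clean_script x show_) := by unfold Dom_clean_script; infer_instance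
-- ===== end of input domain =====

-- B replaces remove_p's restart-after-each-removal loop by a single left-to-right pass
-- that skips each '('..')' span, and the five per-show line loops by one predicate-table
-- driven loop; proved equal on Pre_ (show == 'castle' only with x == [], since there A's
-- while-loop never increments i and never returns).

-- ===== PORT A =====
-- the inner 'for i in range(len(x))' of remove_p: rest = x.drop i, x[i] = head of rest;
-- returns some newx when a removal happened (flag = 1), none when the pass found nothing
def remove_p_scan (x : List Char) : List Char → Nat → Int → Option (List Char)
  | [], _, _ => none
  | c :: rest, i, s =>
    if s < 0 ∧ c = '(' then remove_p_scan x rest (i + 1) (i : Int)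
    else if 0 ≤ s ∧ c = ')' then some (x.take s.toNat ++ x.drop (i + 1))
    else remove_p_scan x rest (i + 1) s

-- termination of A's while-flag loop: a successful pass strictly shortens x
theorem remove_p_scan_some_lt (x : List Char) : ∀ (rest : List Char) (i : Nat) (s : Int)
    (y : List Char), rest = x.drop i → s < (i : Int) → remove_p_scan x rest i s = some y →
    y.length < x.length := by
  intro rest
  induction rest with
  | nil => intro i s y _ _ h; simp [remove_p_scan] at h
  | cons c rest ih =>
    intro i s y hdrop hs h
    have hi : i < x.length := by
      by_contra hge
      rw [List.drop_eq_nil_of_le (by omega)] at hdrop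
      exact absurd hdrop (by simp)
    have hdrop' : rest = x.drop (i + 1) := by
      have h1 : x.drop (i + 1) = (x.drop i).drop 1 := by
        rw [← List.drop_drop]
      rw [h1, ← hdrop]
      simp
    rw [remove_p_scan] at h
    split_ifs at h with h1 h2
    · exact ih (i + 1) (i : Int) y hdrop' (by exact_mod_cast Nat.lt_succ_self i) h
    · have hy : y = x.take s.toNat ++ x.drop (i + 1) := by
        simpa using h.symm
      have hsn : s.toNat < i := by omega
      subst hy
      simp only [List.length_append, List.length_take, List.length_drop]
      omega
    · exact ih (i + 1) s y hdrop' (by omega) h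

def remove_p (x : List Char) : List Char :=
  match h : remove_p_scan x x 0 (-1) with
  | some y => remove_p y
  | none => x
termination_by x.length
decreasing_by exact remove_p_scan_some_lt x x 0 (-1) y (by simp) (by norm_num) h

-- a = i.split(':')[0];  b = i[len(a)+1:];  b = remove_p(b);  [a, b]
def lineA (i : String) : List String :=
  let a : List Char :=
    match PySem.Chars.split? i.toList [':'] with
    | some parts => (PySem.List.pyGet? parts 0).getD []   -- split(...) is never empty
    | none => []
  let b : List Char := PySem.List.slice i.toList (some ((a.length : Int) + 1)) none
  [String.ofList a, String.ofList (remove_p b)]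

def clean_script (x : List String) (show_ : String) : List (List String) :=
  let r : List (List String) := []
  let r := if show_ = "friends" then
      x.foldl (fun r i =>
        if PySem.Str.isIn ": " i ∧ ¬ (PySem.Str.startswith i "SCENE" = true)
        then r ++ [lineA i] else r) r
    else r
  let r := if show_ = "met" then
      x.foldl (fun r i => if PySem.Str.isIn ":" i then r ++ [lineA i] else r) r
    else r
  let r := if show_ = "bang" then
      x.foldl (fun r i =>
        if PySem.Str.isIn ":" i ∧ ¬ (PySem.Str.startswith i "Scene" = true)
        then r ++ [lineA i] else r) r
    else r
  let r := if show_ = "house" then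
      x.foldl (fun r i => if PySem.Str.isIn ":" i then r ++ [lineA i] else r) r
    else r
  let r := if show_ = "grey" then
      x.foldl (fun r i => if PySem.Str.isIn ":" i then r ++ [lineA i] else r) r
    else r
  -- 'castle': Python's 'while i < len(x)' never increments i, so for nonempty x it never
  -- returns (excluded by Pre_); for x = [] the loop runs zero times and leaves r unchanged.
  r

-- ===== PORT B =====
-- s.find(c, i) with the subsequent slicing: splits at the FIRST occurrence of c,
-- some (part before c, part after c); none = find returned -1
def findSplit (c : Char) : List Char → Option (List Char × List Char)
  | [] => none
  | d :: rest => if d = c then some ([], rest)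
                 else (findSplit c rest).map (fun p => (d :: p.1, p.2))

theorem findSplit_shape (c : Char) : ∀ (l p q : List Char),
    findSplit c l = some (p, q) → l = p ++ c :: q := by
  intro l
  induction l with
  | nil => intro p q h; simp [findSplit] at h
  | cons d rest ih =>
    intro p q h
    rw [findSplit] at h
    split_ifs at h with hd
    · simp only [Option.some.injEq, Prod.mk.injEq] at h
      rw [← h.1, ← h.2, hd]; rfl
    · cases hfs : findSplit c rest with
      | none => rw [hfs] at h; simp at h
      | some pr =>
        rw [hfs] at h
        simp only [Option.map_some, Option.some.injEq, Prod.mk.injEq] at h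
        rw [← h.1, ← h.2, List.cons_append, ← ih pr.1 pr.2 (by rw [hfs])]

-- the loop of _strip_parens: each iteration copies the slice before the next '(' and
-- jumps past its matching ')'
def strip_go (cs : List Char) : List Char :=
  match h1 : findSplit '(' cs with
  | none => cs
  | some (a, b) =>
    match h2 : findSplit ')' b with
    | none => cs
    | some (_, post) => a ++ strip_go post
termination_by cs.length
decreasing_by
  have e1 := findSplit_shape '(' cs a b h1
  have e2 := findSplit_shape ')' b _ post h2
  subst e1
  subst e2
  simp
  omega

def keepB (show_ : String) : Option (String → Bool) :=
  if show_ = "friends" then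
    some (fun s => PySem.Str.isIn ": " s && !(PySem.Str.startswith s "SCENE"))
  else if show_ = "met" then some (fun s => PySem.Str.isIn ":" s)
  else if show_ = "bang" then
    some (fun s => PySem.Str.isIn ":" s && !(PySem.Str.startswith s "Scene"))
  else if show_ = "house" then some (fun s => PySem.Str.isIn ":" s)
  else if show_ = "grey" then some (fun s => PySem.Str.isIn ":" s)
  else none

-- a, _, b = line.partition(':')
def lineB (i : String) : List String :=
  let cs := i.toList
  let a := cs.takeWhile (fun c => c ≠ ':')
  let b := cs.drop (a.length + 1)
  [String.ofList a, String.ofList (strip_go b)]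

def clean_script_alt (x : List String) (show_ : String) : List (List String) :=
  match keepB show_ with
  | none => []
  | some keep => x.foldl (fun r line => if keep line then r ++ [lineB line] else r) []

-- ===== PRECONDITION & SPEC =====
-- Pre_ excludes only show == 'castle' with nonempty x: there A's 'while i < len(x)' never
-- increments i, so A never returns a value (it loops forever, or raises IndexError on x[i+1]).
def Pre_clean_script (x : List String) (show_ : String) : Prop :=
  show_ = "castle" → x = []
instance (x : List String) (show_ : String) : Decidable (Pre_clean_script x show_) := by
  unfold Pre_clean_script; infer_instance
def pvWitness_clean_script : List String × String := (["Ross: hi (waves) there"], "friends")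
def Spec_clean_script (x : List String) (show_ : String) (out : List (List String)) : Prop :=
  out = clean_script_alt x show_
instance (x : List String) (show_ : String) (out : List (List String)) :
    Decidable (Spec_clean_script x show_ out) := by unfold Spec_clean_script; infer_instance

-- ===== CLAIM (what is proved, stated in full; the proofs are below) =====
def Claim_equal_clean_script : Prop := ∀ (x : List String) (show_ : String),
  Dom_clean_script x show_ → Pre_clean_script x show_ →
  Spec_clean_script x show_ (clean_script x show_)


-- ===== LEMMAS AND PROOFS =====

-- ---- A's scan characterised by the shape of the scanned suffix ----

theorem scan_none_of_no_lpar (x : List Char) : ∀ (rest : List Char) (i : Nat) (s : Int),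
    s < 0 → (∀ c ∈ rest, c ≠ '(') → remove_p_scan x rest i s = none := by
  intro rest
  induction rest with
  | nil => intro i s _ _; rfl
  | cons c rest ih =>
    intro i s hs hc
    rw [remove_p_scan]
    rw [if_neg (by push Not; intro _; exact hc c (by simp))]
    rw [if_neg (by push Not; intro h0; omega)]
    exact ih (i + 1) s hs (fun d hd => hc d (by simp [hd]))

theorem scan_lpar (x : List Char) : ∀ (a rest : List Char) (i : Nat),
    (∀ c ∈ a, c ≠ '(') →
    remove_p_scan x (a ++ '(' :: rest) i (-1) =
      remove_p_scan x rest (i + a.length + 1) ((i + a.length : Nat) : Int) := by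
  intro a
  induction a with
  | nil =>
    intro rest i _
    rw [List.nil_append, remove_p_scan, if_pos (by norm_num)]
    simp
  | cons c a ih =>
    intro rest i hc
    rw [List.cons_append, remove_p_scan]
    rw [if_neg (by push Not; intro _; exact hc c (by simp))]
    rw [if_neg (by push Not; intro h0; omega)]
    rw [ih rest (i + 1) (fun d hd => hc d (by simp [hd]))]
    have h1 : i + 1 + a.length = i + (c :: a).length := by simp; omega
    rw [h1]

theorem scan_none_of_no_rpar (x : List Char) : ∀ (rest : List Char) (i : Nat) (s : Int),
    0 ≤ s → (∀ c ∈ rest, c ≠ ')') → remove_p_scan x rest i s = none := by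
  intro rest
  induction rest with
  | nil => intro i s _ _; rfl
  | cons c rest ih =>
    intro i s hs hc
    rw [remove_p_scan]
    rw [if_neg (by push Not; intro h0; omega)]
    rw [if_neg (by push Not; intro _; exact hc c (by simp))]
    exact ih (i + 1) s hs (fun d hd => hc d (by simp [hd]))

theorem scan_rpar (x : List Char) : ∀ (m rest : List Char) (i : Nat) (s : Int),
    0 ≤ s → (∀ c ∈ m, c ≠ ')') →
    remove_p_scan x (m ++ ')' :: rest) i s =
      some (x.take s.toNat ++ x.drop (i + m.length + 1)) := by
  intro m
  induction m with
  | nil =>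
    intro rest i s hs _
    rw [List.nil_append, remove_p_scan]
    rw [if_neg (by push Not; intro h0; omega)]
    rw [if_pos ⟨hs, rfl⟩]
    simp
  | cons c m ih =>
    intro rest i s hs hc
    rw [List.cons_append, remove_p_scan]
    rw [if_neg (by push Not; intro h0; omega)]
    rw [if_neg (by push Not; intro _; exact hc c (by simp))]
    rw [ih rest (i + 1) s hs (fun d hd => hc d (by simp [hd]))]
    have h1 : i + 1 + m.length + 1 = i + (c :: m).length + 1 := by simp; omega
    rw [h1]

-- reduce remove_p once the pass's outcome is known
theorem remove_p_of_none (x : List Char) (h : remove_p_scan x x 0 (-1) = none) :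
    remove_p x = x := by
  rw [remove_p]; split <;> simp_all

theorem remove_p_of_some (x y : List Char) (h : remove_p_scan x x 0 (-1) = some y) :
    remove_p x = remove_p y := by
  rw [remove_p]; split <;> simp_all

-- ---- B's pass ----

theorem findSplit_none (c : Char) : ∀ (l : List Char), (∀ d ∈ l, d ≠ c) →
    findSplit c l = none := by
  intro l
  induction l with
  | nil => intro _; rfl
  | cons d rest ih =>
    intro h
    rw [findSplit, if_neg (h d (by simp)), ih (fun e he => h e (by simp [he]))]
    rfl

theorem findSplit_append (c : Char) : ∀ (p q : List Char), (∀ d ∈ p, d ≠ c) →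
    findSplit c (p ++ c :: q) = some (p, q) := by
  intro p
  induction p with
  | nil => intro q _; rw [List.nil_append, findSplit, if_pos rfl]
  | cons d p ih =>
    intro q h
    rw [List.cons_append, findSplit, if_neg (h d (by simp)),
      ih q (fun e he => h e (by simp [he]))]
    rfl

theorem strip_go_of_none (cs : List Char) (h : findSplit '(' cs = none) :
    strip_go cs = cs := by
  rw [strip_go]
  split
  · rfl
  · simp_all

theorem strip_go_of_some_none (cs a b : List Char) (h1 : findSplit '(' cs = some (a, b))
    (h2 : findSplit ')' b = none) : strip_go cs = cs := by
  rw [strip_go]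
  split
  · rfl
  · rename_i a' b' heq
    rw [h1] at heq
    simp only [Option.some.injEq, Prod.mk.injEq] at heq
    obtain ⟨rfl, rfl⟩ := heq
    split
    · rfl
    · simp_all

theorem strip_go_of_some_some (cs a b p post : List Char)
    (h1 : findSplit '(' cs = some (a, b)) (h2 : findSplit ')' b = some (p, post)) :
    strip_go cs = a ++ strip_go post := by
  rw [strip_go]
  split
  · simp_all
  · rename_i a' b' heq
    rw [h1] at heq
    simp only [Option.some.injEq, Prod.mk.injEq] at heq
    obtain ⟨rfl, rfl⟩ := heq
    split
    · simp_all
    · rename_i p' post' heq2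
      rw [h2] at heq2
      simp only [Option.some.injEq, Prod.mk.injEq] at heq2
      rw [heq2.2]

theorem strip_go_eq_self (cs : List Char) (h : ∀ d ∈ cs, d ≠ '(') : strip_go cs = cs :=
  strip_go_of_none cs (findSplit_none '(' cs h)

theorem first_split (c : Char) : ∀ (x : List Char), c ∈ x →
    ∃ a b, x = a ++ c :: b ∧ ∀ d ∈ a, d ≠ c := by
  intro x
  induction x with
  | nil => intro h; simp at h
  | cons d t ih =>
    intro h
    by_cases hd : d = c
    · exact ⟨[], t, by simp [hd], by simp⟩
    · have hc : c ∈ t := by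
        rcases List.mem_cons.mp h with h1 | h1
        · exact absurd h1.symm hd
        · exact h1
      obtain ⟨a, b, hab, hane⟩ := ih hc
      exact ⟨d :: a, b, by simp [hab], by
        intro e he
        rcases List.mem_cons.mp he with h1 | h1
        · exact h1 ▸ hd
        · exact hane e h1⟩

theorem strip_go_append (a t : List Char) (ha : ∀ d ∈ a, d ≠ '(') :
    strip_go (a ++ t) = a ++ strip_go t := by
  by_cases ht : ∀ d ∈ t, d ≠ '('
  · rw [strip_go_of_none t (findSplit_none '(' t ht),
      strip_go_of_none (a ++ t) (findSplit_none '(' (a ++ t) (by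
        intro d hd
        rcases List.mem_append.mp hd with h | h
        · exact ha d h
        · exact ht d h))]
  · push Not at ht
    obtain ⟨c0, hc0mem, hc0⟩ := ht
    obtain ⟨p, q, htq, hp⟩ := first_split '(' t (by rwa [← hc0])
    have hap : ∀ d ∈ a ++ p, d ≠ '(' := by
      intro d hd
      rcases List.mem_append.mp hd with h | h
      · exact ha d h
      · exact hp d h
    have hfull : a ++ t = (a ++ p) ++ '(' :: q := by rw [htq, List.append_assoc]
    by_cases hq : ∀ d ∈ q, d ≠ ')'
    · rw [hfull, strip_go_of_some_none _ (a ++ p) q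
        (findSplit_append '(' (a ++ p) q hap) (findSplit_none ')' q hq), htq,
        strip_go_of_some_none _ p q (findSplit_append '(' p q hp) (findSplit_none ')' q hq),
        List.append_assoc]
    · push Not at hq
      obtain ⟨c1, hc1mem, hc1⟩ := hq
      obtain ⟨m, post, hqm, hm⟩ := first_split ')' q (by rwa [← hc1])
      rw [hfull, hqm, strip_go_of_some_some _ (a ++ p) _ m post
        (findSplit_append '(' (a ++ p) _ hap) (findSplit_append ')' m post hm), htq, hqm,
        strip_go_of_some_some _ p _ m post
        (findSplit_append '(' p _ hp) (findSplit_append ')' m post hm),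
        List.append_assoc]

-- ---- the core: one strip_go pass equals A's removal loop ----

theorem remove_p_eq_strip_go (x : List Char) : remove_p x = strip_go x := by
  generalize hn : x.length = n
  induction n using Nat.strong_induction_on generalizing x with
  | _ n ih =>
  by_cases hl : ∀ c ∈ x, c ≠ '('
  · rw [remove_p_of_none x (scan_none_of_no_lpar x x 0 (-1) (by norm_num) hl)]
    rw [strip_go_eq_self x hl]
  · push Not at hl
    obtain ⟨c0, hc0mem, hc0⟩ := hl
    obtain ⟨a, b, hx, ha⟩ := first_split '(' x (by rwa [← hc0])
    by_cases hr : ∀ c ∈ b, c ≠ ')'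
    · have hscan : remove_p_scan x x 0 (-1) = none := by
        conv_lhs => rw [hx]
        rw [scan_lpar _ a b 0 ha]
        exact scan_none_of_no_rpar _ b (0 + a.length + 1) _ (by positivity) hr
      rw [remove_p_of_none x hscan, hx,
        strip_go_of_some_none _ a b (findSplit_append '(' a b ha) (findSplit_none ')' b hr)]
    · push Not at hr
      obtain ⟨c1, hc1mem, hc1⟩ := hr
      obtain ⟨m, post, hb, hm⟩ := first_split ')' b (by rwa [← hc1])
      have hscan : remove_p_scan x x 0 (-1) = some (a ++ post) := by
        conv_lhs => rw [hx]
        rw [hb, scan_lpar _ a _ 0 ha,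
          scan_rpar _ m post (0 + a.length + 1) _ (by positivity) hm]
        congr 1
        have h1 : ((0 + a.length : Nat) : Int).toNat = a.length := by simp
        have h2 : 0 + a.length + 1 + m.length + 1 = a.length + (m.length + 2) := by omega
        rw [h1, h2, List.take_left, List.drop_append]
        have hd1 : List.drop (a.length + (m.length + 2)) a = [] :=
          List.drop_eq_nil_of_le (by omega)
        have hd2 : a.length + (m.length + 2) - a.length = m.length + 2 := by omega
        rw [hd1, List.nil_append, hd2]
        congr 1
        show List.drop (m.length + 1 + 1) ('(' :: (m ++ ')' :: post)) = post
        rw [List.drop_succ_cons, List.drop_append]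
        have hd3 : List.drop (m.length + 1) m = [] := List.drop_eq_nil_of_le (by omega)
        have hd4 : m.length + 1 - m.length = 1 := by omega
        rw [hd3, List.nil_append, hd4]
        rfl
      rw [remove_p_of_some x _ hscan]
      have hlen : (a ++ post).length < n := by
        rw [← hn, hx, hb]; simp; omega
      rw [ih (a ++ post).length hlen (a ++ post) rfl]
      rw [strip_go_append a post ha, hx, hb,
        strip_go_of_some_some _ a _ m post
          (findSplit_append '(' a _ ha) (findSplit_append ')' m post hm)]

-- ---- the speaker/text split: split(':')[0] and the partition agree ----

theorem splitOn_go_acc (sep : List Char) : ∀ (fuel : Nat) (l cur : List Char)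
    (acc : List (List Char)), PySem.Chars.splitOn.go sep fuel l cur acc =
      acc.reverse ++ PySem.Chars.splitOn.go sep fuel l cur [] := by
  intro fuel
  induction fuel with
  | zero => intro l cur acc; simp [PySem.Chars.splitOn.go]
  | succ f ih =>
    intro l cur acc
    cases l with
    | nil => simp [PySem.Chars.splitOn.go]
    | cons c rest =>
      simp only [PySem.Chars.splitOn.go]
      split_ifs with h
      · rw [ih _ _ (cur.reverse :: acc), ih _ _ [cur.reverse]]
        simp
      · exact ih rest (c :: cur) acc

theorem splitOn_go_colon_head : ∀ (fuel : Nat) (l cur : List Char), l.length < fuel →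
    ∃ t, PySem.Chars.splitOn.go [':'] fuel l cur [] =
      (cur.reverse ++ l.takeWhile (fun c => c ≠ ':')) :: t := by
  intro fuel
  induction fuel with
  | zero => intro l cur h; omega
  | succ f ih =>
    intro l cur hlt
    cases l with
    | nil => exact ⟨[], by simp [PySem.Chars.splitOn.go]⟩
    | cons c rest =>
      simp only [PySem.Chars.splitOn.go]
      by_cases hc : c = ':'
      · rw [if_pos (by simp [hc, List.isPrefixOf])]
        rw [splitOn_go_acc]
        exact ⟨PySem.Chars.splitOn.go [':'] f (List.drop 1 (c :: rest)) [] [], by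
          simp [hc]⟩
      · rw [if_neg (by simp [List.isPrefixOf]; exact fun h => absurd h.symm hc)]
        obtain ⟨t, ht⟩ := ih rest (c :: cur) (by simp at hlt ⊢; omega)
        exact ⟨t, by rw [ht]; simp [hc]⟩

theorem splitOn_colon_head (l : List Char) :
    ∃ t, PySem.Chars.splitOn l [':'] = (l.takeWhile (fun c => c ≠ ':')) :: t := by
  obtain ⟨t, ht⟩ := splitOn_go_colon_head (l.length + 1) l [] (by omega)
  exact ⟨t, by rw [show PySem.Chars.splitOn l [':'] =
    PySem.Chars.splitOn.go [':'] (l.length + 1) l [] [] from rfl, ht]; simp⟩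

theorem lineA_eq_lineB (i : String) : lineA i = lineB i := by
  obtain ⟨t, ht⟩ := splitOn_colon_head i.toList
  have hsplit : PySem.Chars.split? i.toList [':'] =
      some ((i.toList.takeWhile (fun c => c ≠ ':')) :: t) := by
    rw [show PySem.Chars.split? i.toList [':'] =
      some (PySem.Chars.splitOn i.toList [':']) from rfl, ht]
  have hget : (PySem.List.pyGet? ((i.toList.takeWhile (fun c => c ≠ ':')) :: t) 0).getD [] =
      i.toList.takeWhile (fun c => c ≠ ':') := by
    simp [PySem.List.pyGet?, PySem.List.pyIdx?]
  have hslice : PySem.List.slice i.toList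
      (some (((i.toList.takeWhile (fun c => c ≠ ':')).length : Int) + 1)) none =
      i.toList.drop ((i.toList.takeWhile (fun c => c ≠ ':')).length + 1) := by
    have h := PySem.List.slice_from_natCast i.toList
      ((i.toList.takeWhile (fun c => c ≠ ':')).length + 1)
    rw [← h]
    norm_cast
  simp only [lineA, lineB, hsplit, hget, hslice, remove_p_eq_strip_go]

-- ===== VERDICT (by name: the statement is the Claim_ definition above) =====
theorem clean_script_spec : Claim_equal_clean_script := by
  intro x show_ _ hpre
  unfold Spec_clean_script clean_script clean_script_alt keepB
  by_cases h1 : show_ = "friends"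
  · subst h1; simp [lineA_eq_lineB]
  by_cases h2 : show_ = "met"
  · subst h2; simp [lineA_eq_lineB]
  by_cases h3 : show_ = "bang"
  · subst h3; simp [lineA_eq_lineB]
  by_cases h4 : show_ = "house"
  · subst h4; simp [lineA_eq_lineB]
  by_cases h5 : show_ = "grey"
  · subst h5; simp [lineA_eq_lineB]
  simp [h1, h2, h3, h4, h5]
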